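-- pv_equiv track=rewrite | github.com/rikuu/hgga | leafify.py | construct_hierarchies
-- ===== SOURCE A (Python) =====
-- def construct_hierarchies(alignments, min_leaf_size):
--     # topology[i] is the number of leaves in tree i
--     trees, topology = [], []
--     for reads in alignments.values():
--         sorting = sorted(reads, key = lambda x: x[0])
--
--         tree = []
--         leaf, leaf_size, i = 0, 0, 0
--         while i < len(sorting):
--             # Add next bin of reads to a leaf
--             j = i
--             while j < len(sorting) and sorting[j][0] == sorting[i][0]:
--                 tree.append((sorting[j][1], leaf))
--                 leaf_size += 1
--                 j += 1
--
--             i = j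
--
--             # Move to next leaf
--             if leaf_size >= min_leaf_size:
--                 leaf += 1
--                 leaf_size = 0
--
--         trees.append(tree)
--         topology.append(leaf + 1)
--
--     return trees, topology
-- ===== SOURCE B (Python) =====
-- def construct_hierarchies(alignments, min_leaf_size):
--     # Group ids by key with a dict (no full sort), sort only the distinct keys,
--     # compute each key-group's leaf label in a staged pass over the key list,
--     # then expand the groups into the tree.
--     trees, topology = [], []
--     for reads in alignments.values():
--         groups = {}
--         for key, rid in reads:
--             groups.setdefault(key, []).append(rid)
--         keys = sorted(groups)
--         labels, leaf, size = [], 0, 0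
--         for key in keys:
--             labels.append(leaf)
--             size += len(groups[key])
--             if size >= min_leaf_size:
--                 leaf, size = leaf + 1, 0
--         tree = [(rid, lab) for key, lab in zip(keys, labels) for rid in groups[key]]
--         trees.append(tree)
--         topology.append(leaf + 1)
--     return trees, topology
-- ===== Notes on version B (the rewrite author's own statement) =====
-- stated objective: alternative
-- what changed: A stably sorts each full read list and scans it with nested i/j index loops detecting equal-key runs; B never sorts the reads: it groups ids by key into a dict in one pass, sorts only the distinct keys, computes each key-group's leaf label in a staged pass over the key list, and then expands the groups into the tree (correct because the stable sort equals the concatenation, over sorted distinct keys, of the per-key subsequences).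
import Mathlib
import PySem

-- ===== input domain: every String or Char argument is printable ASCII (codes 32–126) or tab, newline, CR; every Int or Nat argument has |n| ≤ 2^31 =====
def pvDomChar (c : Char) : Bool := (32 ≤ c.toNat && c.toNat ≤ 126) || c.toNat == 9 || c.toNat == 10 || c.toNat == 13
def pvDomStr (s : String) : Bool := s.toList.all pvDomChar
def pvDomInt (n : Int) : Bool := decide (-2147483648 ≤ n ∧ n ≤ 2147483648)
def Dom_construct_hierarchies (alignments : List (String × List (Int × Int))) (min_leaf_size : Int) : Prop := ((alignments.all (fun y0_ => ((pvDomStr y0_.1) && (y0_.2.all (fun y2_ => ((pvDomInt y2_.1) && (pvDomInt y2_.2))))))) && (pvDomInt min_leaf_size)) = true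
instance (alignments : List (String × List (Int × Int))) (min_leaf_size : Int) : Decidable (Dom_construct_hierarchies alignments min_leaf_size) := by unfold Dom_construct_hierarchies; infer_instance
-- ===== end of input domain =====

-- B replaces A's sort-everything-then-scan-runs algorithm by dict grouping of ids
-- per key, a sort of the distinct keys only, a staged label pass over the key list
-- and a final expansion (objective: alternative algorithm / data structure).

-- ===== PORT A =====
-- inner while loop of A: j scans the current bin; Python's sorting[j] is in
-- range whenever it is read, so getD's default (0, 0) is never used; the fuel
-- argument (always ≥ s.length + 1 - j at the call sites) only makes the loop
-- structurally recursive and is never exhausted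
def pvAInner (s : List (Int × Int)) (pivot : Int) : Nat → List (Int × Int) → Int → Int → Nat →
    List (Int × Int) × Int × Nat
  | 0, tree, _, ls, j => (tree, ls, j)
  | fuel + 1, tree, leaf, ls, j =>
    if j < s.length ∧ (s.getD j (0, 0)).1 = pivot then
      pvAInner s pivot fuel (tree ++ [((s.getD j (0, 0)).2, leaf)]) leaf (ls + 1) (j + 1)
    else (tree, ls, j)

-- outer while loop of A (fuel is again only a structural-recursion guard:
-- i strictly increases each iteration, so s.length + 1 iterations never run out)
def pvAOuter (m : Int) (s : List (Int × Int)) : Nat → List (Int × Int) → Int → Int → Nat →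
    List (Int × Int) × Int
  | 0, tree, leaf, _, _ => (tree, leaf)
  | fuel + 1, tree, leaf, ls, i =>
    if i < s.length then
      let r := pvAInner s (s.getD i (0, 0)).1 (s.length + 1) tree leaf ls i
      let st := if r.2.1 ≥ m then (leaf + 1, (0 : Int)) else (leaf, r.2.1)
      pvAOuter m s fuel r.1 st.1 st.2 r.2.2
    else (tree, leaf)

def construct_hierarchies (alignments : List (String × List (Int × Int))) (min_leaf_size : Int) :
    (List (List (Int × Int))) × List Int :=
  (PySem.Dict.ofList alignments).values.foldl
    (fun acc reads =>
      let sorting := PySem.List.sorted reads (fun x => x.1) false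
      let r := pvAOuter min_leaf_size sorting (sorting.length + 1) [] 0 0 0
      (acc.1 ++ [r.1], acc.2 ++ [r.2 + 1]))
    ([], [])

-- ===== PORT B =====
-- B's label loop: for key in keys: labels.append(leaf); size += len(groups[key]); …
-- (gv k stands for groups[key]; every key iterated is present in the dict, so the
-- lookup is exact)
def pvBLab (m : Int) (gv : Int → List Int) : List Int → List Int → Int → Int →
    List Int × Int
  | [], labels, leaf, _ => (labels, leaf)
  | k :: kt, labels, leaf, size =>
    let size' := size + ((gv k).length : Int)
    if size' ≥ m then pvBLab m gv kt (labels ++ [leaf]) (leaf + 1) 0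
    else pvBLab m gv kt (labels ++ [leaf]) leaf size'

def construct_hierarchies_alt (alignments : List (String × List (Int × Int))) (min_leaf_size : Int) :
    (List (List (Int × Int))) × List Int :=
  (PySem.Dict.ofList alignments).values.foldl
    (fun acc reads =>
      -- groups.setdefault(key, []).append(rid): d[key] = d.get(key, []) + [rid]
      let groups := reads.foldl (fun d p => d.modify p.1 [] (· ++ [p.2])) PySem.Dict.empty
      let keys := PySem.List.sorted groups.keys (fun k => k) false
      let r := pvBLab min_leaf_size (fun k => groups.getD k []) keys [] 0 0
      let tree := (keys.zip r.1).flatMap (fun kl => (groups.getD kl.1 []).map (fun rid => (rid, kl.2)))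
      (acc.1 ++ [tree], acc.2 ++ [r.2 + 1]))
    ([], [])

-- ===== PRECONDITION & SPEC =====
def Spec_construct_hierarchies (alignments : List (String × List (Int × Int))) (min_leaf_size : Int) (out : (List (List (Int × Int))) × List Int) : Prop := out = construct_hierarchies_alt alignments min_leaf_size
instance (alignments : List (String × List (Int × Int))) (min_leaf_size : Int) (out : (List (List (Int × Int))) × List Int) : Decidable (Spec_construct_hierarchies alignments min_leaf_size out) := by unfold Spec_construct_hierarchies; infer_instance

-- ===== CLAIM (what is proved, stated in full; the proofs are below) =====
def Claim_equal_construct_hierarchies : Prop := ∀ (alignments : List (String × List (Int × Int))) (min_leaf_size : Int), Dom_construct_hierarchies alignments min_leaf_size → Spec_construct_hierarchies alignments min_leaf_size (construct_hierarchies alignments min_leaf_size)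

-- ===== LEMMAS AND PROOFS =====

-- A's inner loop collects exactly the takeWhile-run of equal keys from position j
theorem pvAInner_spec (s : List (Int × Int)) (p : Int) :
    ∀ (fuel : Nat) (tree : List (Int × Int)) (leaf ls : Int) (j : Nat), s.length < fuel + j →
    pvAInner s p fuel tree leaf ls j =
      (tree ++ ((s.drop j).takeWhile (fun x => x.1 == p)).map (fun x => (x.2, leaf)),
       ls + (((s.drop j).takeWhile (fun x => x.1 == p)).length : Int),
       j + ((s.drop j).takeWhile (fun x => x.1 == p)).length) := by
  intro fuel
  induction fuel with
  | zero =>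
    intro tree leaf ls j hb
    rw [pvAInner, List.drop_eq_nil_of_le (by omega)]
    simp
  | succ fuel ih =>
    intro tree leaf ls j hb
    by_cases h : j < s.length ∧ (s.getD j (0, 0)).1 = p
    · obtain ⟨hj, hk⟩ := h
      rw [pvAInner, if_pos ⟨hj, hk⟩, ih _ _ _ _ (by omega), List.drop_eq_getElem_cons hj]
      have hg : s.getD j (0, 0) = s[j] := List.getD_eq_getElem s (0, 0) hj
      have hq : (s[j].1 == p) = true := by rw [← hg, hk, beq_self_eq_true]
      have htw : List.takeWhile (fun x : Int × Int => x.1 == p) (s[j] :: s.drop (j + 1))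
          = s[j] :: List.takeWhile (fun x : Int × Int => x.1 == p) (s.drop (j + 1)) := by
        rw [List.takeWhile_cons]; simp [hq]
      rw [htw]
      simp only [Prod.mk.injEq]
      refine ⟨?_, ?_, ?_⟩
      · rw [hg, List.append_assoc, List.singleton_append, List.map_cons]
      · rw [List.length_cons]; push_cast; ring
      · simp; omega
    · rw [pvAInner, if_neg h]
      by_cases hj : j < s.length
      · have hk : ¬ (s.getD j (0, 0)).1 = p := by tauto
        rw [List.drop_eq_getElem_cons hj]
        have hg : s.getD j (0, 0) = s[j] := List.getD_eq_getElem s (0, 0) hj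
        have hq : (s[j].1 == p) = false := by rw [← hg]; simpa using hk
        have htw : List.takeWhile (fun x : Int × Int => x.1 == p) (s[j] :: s.drop (j + 1)) = [] := by
          rw [List.takeWhile_cons]; simp [hq]
        rw [htw]; simp
      · rw [List.drop_eq_nil_of_le (by omega)]
        simp

-- run-structured intermediate form of A's loops: consume one whole bin per step
def pvRun (m : Int) : List (Int × Int) → List (Int × Int) → Int → Int → List (Int × Int) × Int
  | [], tree, leaf, _ => (tree, leaf)
  | (k, r) :: xs, tree, leaf, ls =>
    let run := (k, r) :: xs.takeWhile (fun x => x.1 == k)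
    let st := if ls + (run.length : Int) ≥ m then (leaf + 1, (0 : Int))
              else (leaf, ls + (run.length : Int))
    pvRun m (xs.dropWhile (fun x => x.1 == k)) (tree ++ run.map (fun x => (x.2, leaf))) st.1 st.2
termination_by l => l.length
decreasing_by
  have := List.length_dropWhile_le (fun x : Int × Int => x.1 == k) xs
  simp only [List.length_cons]
  omega

theorem pvDropTake {alpha : Type} (p : alpha → Bool) (l : List alpha) :
    l.drop (l.takeWhile p).length = l.dropWhile p := by
  induction l with
  | nil => simp
  | cons a t ih =>
    by_cases hp : p a <;> simp [hp, ih]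

theorem pvAOuter_eq_pvRun (m : Int) (s : List (Int × Int)) :
    ∀ (fuel : Nat) (tree : List (Int × Int)) (leaf ls : Int) (i : Nat), s.length < fuel + i →
    pvAOuter m s fuel tree leaf ls i = pvRun m (s.drop i) tree leaf ls := by
  intro fuel
  induction fuel with
  | zero =>
    intro tree leaf ls i hb
    rw [pvAOuter, List.drop_eq_nil_of_le (by omega), pvRun]
  | succ fuel ih =>
    intro tree leaf ls i hb
    by_cases h : i < s.length
    · rw [pvAOuter, if_pos h]
      simp only []
      have hg : s.getD i (0, 0) = s[i] := List.getD_eq_getElem s (0, 0) h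
      have hdrop : s.drop i = s[i] :: s.drop (i + 1) := List.drop_eq_getElem_cons h
      rw [pvAInner_spec s (s.getD i (0, 0)).1 (s.length + 1) tree leaf ls i (by omega), hg]
      have hcons : s[i] = (s[i].1, s[i].2) := rfl
      have htwc : List.takeWhile (fun x : Int × Int => x.1 == s[i].1) (List.drop i s)
          = s[i] :: List.takeWhile (fun x : Int × Int => x.1 == s[i].1) (List.drop (i + 1) s) := by
        rw [hdrop, List.takeWhile_cons]; simp
      rw [htwc]
      rw [ih _ _ _ _ (by simp only [List.length_cons]; omega)]
      conv_rhs => rw [hdrop, hcons, pvRun]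
      have hdw : List.drop (i + (s[i] :: List.takeWhile (fun x : Int × Int => x.1 == s[i].1) (List.drop (i+1) s)).length) s
          = List.dropWhile (fun x : Int × Int => x.1 == s[i].1) (List.drop (i + 1) s) := by
        rw [List.length_cons,
          show i + ((List.takeWhile (fun x : Int × Int => x.1 == s[i].1) (List.drop (i+1) s)).length + 1)
             = (i + 1) + (List.takeWhile (fun x : Int × Int => x.1 == s[i].1) (List.drop (i+1) s)).length from by omega,
          ← List.drop_drop, pvDropTake]
      rw [hdw]
    · rw [pvAOuter, if_neg h, List.drop_eq_nil_of_le (by omega), pvRun]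

-- insertBy unfolding lemmas
theorem pvInsertBy_nil {alpha : Type} (p : alpha → alpha → Bool) (x : alpha) :
    PySem.List.insertBy p x [] = [x] := rfl

theorem pvInsertBy_cons {alpha : Type} (p : alpha → alpha → Bool) (x y : alpha) (ys : List alpha) :
    PySem.List.insertBy p x (y :: ys) =
      if p x y then x :: y :: ys else y :: PySem.List.insertBy p x ys := rfl

-- insertBy walks past a prefix it does not insert before
theorem pvInsertBy_append_left {alpha : Type} (p : alpha → alpha → Bool) (x : alpha)
    (L M : List alpha) (h : ∀ y ∈ L, p x y = false) :
    PySem.List.insertBy p x (L ++ M) = L ++ PySem.List.insertBy p x M := by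
  induction L with
  | nil => simp
  | cons a t ih =>
    rw [List.cons_append, pvInsertBy_cons, if_neg (by simp [h a (by simp)]), List.cons_append,
      ih (fun y hy => h y (by simp [hy]))]

-- insertBy prepends when it must insert before the head (or the list is empty)
theorem pvInsertBy_front {alpha : Type} (p : alpha → alpha → Bool) (x : alpha)
    (M : List alpha) (h : ∀ y t, M = y :: t → p x y = true) :
    PySem.List.insertBy p x M = x :: M := by
  cases M with
  | nil => rfl
  | cons y t => rw [pvInsertBy_cons, if_pos (h y t rfl)]

-- flatMap of the x-augmented group function over keys avoiding x.1
theorem pvFlatMap_noX (x : Int × Int) (g : Int → List (Int × Int)) (ks : List Int)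
    (h : x.1 ∉ ks) :
    ks.flatMap (fun k => g k ++ if k = x.1 then [x] else []) = ks.flatMap g := by
  induction ks with
  | nil => rfl
  | cons k kt ih =>
    rw [List.flatMap_cons, List.flatMap_cons, if_neg (by rintro rfl; exact h (by simp)),
      List.append_nil, ih (fun hm => h (by simp [hm]))]

-- the head of a flatMap of nonempty key-homogeneous blocks carries a key of the list
theorem pvFlatMapHead (g : Int → List (Int × Int)) :
    ∀ (ks : List Int), (∀ k ∈ ks, g k ≠ []) → (∀ k ∈ ks, ∀ y ∈ g k, y.1 = k) →
    ∀ y t, ks.flatMap g = y :: t → y.1 ∈ ks := by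
  intro ks
  induction ks with
  | nil => intro _ _ y t h; simp at h
  | cons k kt ih =>
    intro hne hkey y t h
    rw [List.flatMap_cons] at h
    cases hg : g k with
    | nil => exact absurd hg (hne k (by simp))
    | cons a s =>
      rw [hg, List.cons_append] at h
      injection h with h1 _
      have : y ∈ g k := by rw [hg, ← h1]; simp
      have := hkey k (by simp) y this
      simp [this]

-- core step of the stability argument: inserting one element into a list of
-- key-blocks lands at the end of its own block (or opens a fresh block)
theorem pvInsertBy_flatMap (x : Int × Int) (g : Int → List (Int × Int)) :
    ∀ ks : List Int, ks.Pairwise (· < ·) →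
    (∀ k ∈ ks, ∀ y ∈ g k, y.1 = k) → (∀ k ∈ ks, g k ≠ []) → (x.1 ∉ ks → g x.1 = []) →
    PySem.List.insertBy (fun a b => decide (a.1 < b.1)) x (ks.flatMap g)
    = (if x.1 ∈ ks then ks else PySem.List.insertBy (fun a b => decide (a < b)) x.1 ks).flatMap
        (fun k => g k ++ if k = x.1 then [x] else []) := by
  intro ks
  induction ks with
  | nil =>
    intro _ _ _ hfresh
    rw [if_neg (by simp), List.flatMap_nil, pvInsertBy_nil, pvInsertBy_nil, List.flatMap_cons,
      hfresh (by simp), List.flatMap_nil]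
    simp
  | cons k kt ih =>
    intro hp hkey hne hfresh
    have hklt := (List.pairwise_cons.mp hp).1
    have hpt := (List.pairwise_cons.mp hp).2
    rcases lt_trichotomy x.1 k with hlt | heq | hgt
    · -- x.1 < k : fresh, inserted in front of everything
      have hnm : x.1 ∉ k :: kt := by
        intro hm
        rcases List.mem_cons.mp hm with h1 | h2
        · omega
        · have := hklt _ h2; omega
      rw [List.flatMap_cons]
      have hfront : PySem.List.insertBy (fun a b : Int × Int => decide (a.1 < b.1)) x
          (g k ++ kt.flatMap g) = x :: (g k ++ kt.flatMap g) := by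
        apply pvInsertBy_front
        intro y t hyt
        have hy : y ∈ g k := by
          cases hg : g k with
          | nil => exact absurd hg (hne k (by simp))
          | cons a s => rw [hg, List.cons_append] at hyt; injection hyt with h1 _; exact h1 ▸ List.mem_cons_self
        have := hkey k (by simp) y hy
        simp [this]; omega
      rw [hfront, if_neg hnm, pvInsertBy_cons, if_pos (by simp [hlt])]
      simp only [List.flatMap_cons]
      rw [hfresh hnm, pvFlatMap_noX x g kt (fun hm => hnm (by simp [hm]))]
      have hkx : ¬ (k = x.1) := by omega
      simp [hkx]
    · -- x.1 = k : append x at the end of k's block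
      have hmem : x.1 ∈ k :: kt := by simp [heq]
      have hnkt : x.1 ∉ kt := by intro hm; have := hklt _ hm; omega
      have hfront : PySem.List.insertBy (fun a b : Int × Int => decide (a.1 < b.1)) x
          (kt.flatMap g) = x :: kt.flatMap g := by
        apply pvInsertBy_front
        intro y t hyt
        have hykt := pvFlatMapHead g kt (fun k hk => hne k (by simp [hk]))
          (fun k hk => hkey k (by simp [hk])) y t hyt
        have := hklt _ hykt
        simp; omega
      rw [List.flatMap_cons,
        pvInsertBy_append_left _ _ (g k) _
          (fun y hy => by have := hkey k (by simp) y hy; simp [this]; omega),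
        hfront, if_pos hmem, List.flatMap_cons, if_pos heq.symm,
        pvFlatMap_noX x g kt hnkt, List.append_assoc, List.singleton_append]
    · -- k < x.1 : skip k's whole block and recurse
      have hrec := ih hpt (fun k hk => hkey k (by simp [hk])) (fun k hk => hne k (by simp [hk]))
        (fun hm2 => hfresh (by simp; exact ⟨by omega, hm2⟩))
      rw [List.flatMap_cons,
        pvInsertBy_append_left _ _ (g k) _
          (fun y hy => by have := hkey k (by simp) y hy; simp [this]; omega),
        hrec]
      by_cases hm : x.1 ∈ kt
      · rw [if_pos hm, if_pos (by simp [hm]), List.flatMap_cons, if_neg (by omega),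
          List.append_nil]
      · rw [if_neg hm,
          if_neg (fun hmm => (List.mem_cons.mp hmm).elim (by omega) hm), pvInsertBy_cons,
          if_neg (by simp; omega), List.flatMap_cons, if_neg (by omega), List.append_nil]

-- STABILITY: the stable sort by key equals the concatenation, over the sorted
-- distinct keys, of the per-key subsequences of the original list
theorem pvSorted_eq_flatMap (reads : List (Int × Int)) :
    PySem.List.sorted reads (fun x => x.1) false
    = (PySem.List.sorted (PySem.Set.ofList (reads.map Prod.fst)) (fun k => k) false).flatMap
        (fun k => reads.filter (fun x => x.1 == k)) := by
  induction reads using List.reverseRecOn with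
  | nil => simp [PySem.List.sorted_eq_foldl_insertBy]
  | append_singleton reads x ih =>
    have hkeyg : ∀ k, ∀ y ∈ reads.filter (fun z : Int × Int => z.1 == k), y.1 = k := by
      intro k y hy
      simpa using List.of_mem_filter hy
    have hp := PySem.List.sorted_ofList_pairwise_lt (reads.map Prod.fst)
    have hmemks : ∀ k : Int,
        k ∈ PySem.List.sorted (PySem.Set.ofList (reads.map Prod.fst)) (fun k => k) false ↔
        k ∈ reads.map Prod.fst := by
      intro k
      rw [PySem.List.mem_sorted, PySem.Set.mem_ofList]
    have hne : ∀ k ∈ PySem.List.sorted (PySem.Set.ofList (reads.map Prod.fst)) (fun k => k) false,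
        reads.filter (fun z : Int × Int => z.1 == k) ≠ [] := by
      intro k hk hnil
      obtain ⟨y, hy, hyk⟩ := List.mem_map.mp ((hmemks k).mp hk)
      have := List.filter_eq_nil_iff.mp hnil y hy
      simp [hyk] at this
    have hfresh : x.1 ∉ PySem.List.sorted (PySem.Set.ofList (reads.map Prod.fst)) (fun k => k) false →
        reads.filter (fun z : Int × Int => z.1 == x.1) = [] := by
      intro hnm
      rw [List.filter_eq_nil_iff]
      intro y hy
      have : y.1 ∉ reads.map Prod.fst → False := fun h => h (List.mem_map.mpr ⟨y, hy, rfl⟩)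
      by_contra hc
      exact hnm ((hmemks x.1).mpr (by
        have : y.1 = x.1 := by simpa using hc
        exact this ▸ List.mem_map.mpr ⟨y, hy, rfl⟩))
    have hL : PySem.List.sorted (reads ++ [x]) (fun z : Int × Int => z.1) false
        = PySem.List.insertBy (fun a b : Int × Int => decide (a.1 < b.1)) x
            (PySem.List.sorted reads (fun z : Int × Int => z.1) false) := by
      rw [PySem.List.sorted_eq_foldl_insertBy, PySem.List.sorted_eq_foldl_insertBy,
        List.foldl_append, List.foldl_cons, List.foldl_nil]
    have hgfun : (fun k => (reads ++ [x]).filter (fun z : Int × Int => z.1 == k))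
        = fun k => reads.filter (fun z : Int × Int => z.1 == k) ++ if k = x.1 then [x] else [] := by
      funext k
      rw [List.filter_append]
      congr 1
      by_cases h : k = x.1
      · simp [List.filter, h]
      · simp only [List.filter]
        rw [if_neg h]
        have : (x.1 == k) = false := by simp; omega
        simp [this]
    have hRks : PySem.List.sorted (PySem.Set.ofList ((reads ++ [x]).map Prod.fst)) (fun k => k) false
        = (if x.1 ∈ PySem.List.sorted (PySem.Set.ofList (reads.map Prod.fst)) (fun k => k) false
           then PySem.List.sorted (PySem.Set.ofList (reads.map Prod.fst)) (fun k => k) false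
           else PySem.List.insertBy (fun a b : Int => decide (a < b)) x.1
             (PySem.List.sorted (PySem.Set.ofList (reads.map Prod.fst)) (fun k => k) false)) := by
      rw [List.map_append, List.map_cons, List.map_nil, PySem.Set.ofList_append_singleton]
      by_cases hm : x.1 ∈ PySem.List.sorted (PySem.Set.ofList (reads.map Prod.fst)) (fun k => k) false
      · rw [if_pos hm, PySem.Set.add_of_mem (by rw [PySem.Set.mem_ofList]; exact (hmemks x.1).mp hm)]
      · rw [if_neg hm, PySem.Set.add_of_not_mem (by
            rw [PySem.Set.mem_ofList]; exact fun h => hm ((hmemks x.1).mpr h)),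
          PySem.List.sorted_eq_foldl_insertBy, List.foldl_append, List.foldl_cons, List.foldl_nil,
          ← PySem.List.sorted_eq_foldl_insertBy]
    rw [hL, ih, hRks, hgfun,
      pvInsertBy_flatMap x _ _ hp (fun k _ => hkeyg k) hne hfresh]

-- B's label loop only ever appends to the accumulated label list
theorem pvBLab_labels (m : Int) (gv : Int → List Int) :
    ∀ (ks labels : List Int) (leaf size : Int),
    pvBLab m gv ks labels leaf size
      = (labels ++ (pvBLab m gv ks [] leaf size).1, (pvBLab m gv ks [] leaf size).2) := by
  intro ks
  induction ks with
  | nil => intro labels leaf size; simp [pvBLab]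
  | cons k kt ih =>
    intro labels leaf size
    rw [pvBLab, pvBLab]
    by_cases h : size + ((gv k).length : Int) ≥ m
    · rw [if_pos h, if_pos h, ih (labels ++ [leaf]), ih ([] ++ [leaf])]; simp
    · rw [if_neg h, if_neg h, ih (labels ++ [leaf]), ih ([] ++ [leaf])]; simp

-- a homogeneous block followed by a differently-keyed remainder splits cleanly
theorem pvTakeDropBlock (k0 : Int) (L M : List (Int × Int))
    (hL : ∀ y ∈ L, y.1 = k0) (hM : ∀ y t, M = y :: t → y.1 ≠ k0) :
    (L ++ M).takeWhile (fun x => x.1 == k0) = L ∧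
    (L ++ M).dropWhile (fun x => x.1 == k0) = M := by
  induction L with
  | nil =>
    cases M with
    | nil => simp
    | cons y t =>
      have := hM y t rfl
      constructor
      · rw [List.nil_append, List.takeWhile_cons, if_neg (by simp [this])]
      · rw [List.nil_append, List.dropWhile_cons, if_neg (by simp [this])]
  | cons a s ih =>
    have ha : (a.1 == k0) = true := by simp [hL a (by simp)]
    obtain ⟨ht, hd⟩ := ih (fun y hy => hL y (by simp [hy]))
    constructor
    · rw [List.cons_append, List.takeWhile_cons, if_pos ha, ht]
    · rw [List.cons_append, List.dropWhile_cons, if_pos ha, hd]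

-- run consumption over key-blocks equals the staged label pass plus expansion
theorem pvRun_blocks (m : Int) (g : Int → List (Int × Int)) (gv : Int → List Int) :
    ∀ ks : List Int, ks.Pairwise (· < ·) →
    (∀ k ∈ ks, ∀ y ∈ g k, y.1 = k) → (∀ k ∈ ks, g k ≠ []) →
    (∀ k ∈ ks, gv k = (g k).map Prod.snd) →
    ∀ (tree : List (Int × Int)) (leaf ls : Int),
    pvRun m (ks.flatMap g) tree leaf ls
      = (tree ++ (ks.zip (pvBLab m gv ks [] leaf ls).1).flatMap
           (fun kl => (gv kl.1).map (fun rid => (rid, kl.2))),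
         (pvBLab m gv ks [] leaf ls).2) := by
  intro ks
  induction ks with
  | nil => intro _ _ _ _ tree leaf ls; simp [pvRun, pvBLab]
  | cons k kt ih =>
    intro hp hkey hne hgv tree leaf ls
    have hklt := (List.pairwise_cons.mp hp).1
    have hpt := (List.pairwise_cons.mp hp).2
    cases hg : g k with
    | nil => exact absurd hg (hne k (by simp))
    | cons y ys =>
      have hk0 : y.1 = k := hkey k (by simp) y (by rw [hg]; simp)
      have hys : ∀ z ∈ ys, z.1 = k := fun z hz => hkey k (by simp) z (by rw [hg]; simp [hz])
      have hMhead : ∀ z t, kt.flatMap g = z :: t → z.1 ≠ k := by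
        intro z t hzt
        have := pvFlatMapHead g kt (fun k hk => hne k (by simp [hk]))
          (fun k hk => hkey k (by simp [hk])) z t hzt
        have := hklt _ this
        omega
      obtain ⟨htake, hdrop⟩ := pvTakeDropBlock k ys (kt.flatMap g) hys hMhead
      have hy : y = (y.1, y.2) := rfl
      rw [List.flatMap_cons, hg, List.cons_append, hy, hk0, pvRun]
      rw [htake, hdrop]
      have hlen : ((k, y.2) :: ys).length = (g k).length := by rw [hg]; rfl
      have hrun : ((k, y.2) :: ys).map (fun x => (x.2, leaf)) = (g k).map (fun x => (x.2, leaf)) := by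
        rw [hg]; simp
      have hglen : ((gv k).length : Int) = ((g k).length : Int) := by
        rw [hgv k (by simp), List.length_map]
      rw [ih hpt (fun k hk => hkey k (by simp [hk])) (fun k hk => hne k (by simp [hk]))
        (fun k hk => hgv k (by simp [hk]))]
      rw [pvBLab]
      rw [hrun, hlen, hglen]
      by_cases hcond : ls + ((g k).length : Int) ≥ m
      · rw [if_pos hcond, if_pos hcond, pvBLab_labels m gv kt ([] ++ [leaf])]
        simp only [List.nil_append, List.singleton_append, List.zip_cons_cons, List.flatMap_cons]
        rw [hgv k (by simp), List.map_map]
        simp [Function.comp, List.append_assoc]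
      · rw [if_neg hcond, if_neg hcond, pvBLab_labels m gv kt ([] ++ [leaf])]
        simp only [List.nil_append, List.singleton_append, List.zip_cons_cons, List.flatMap_cons]
        rw [hgv k (by simp), List.map_map]
        simp [Function.comp, List.append_assoc]

-- one read list: A's sorted-run scan equals B's group/sort-keys/label/expand
theorem pvPerReads (m : Int) (reads : List (Int × Int)) :
    (pvAOuter m (PySem.List.sorted reads (fun x => x.1) false)
      ((PySem.List.sorted reads (fun x => x.1) false).length + 1) [] 0 0 0)
    = (((PySem.List.sorted
          (reads.foldl (fun d p => d.modify p.1 [] (· ++ [p.2])) PySem.Dict.empty).keys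
          (fun k => k) false).zip
         (pvBLab m (fun k => (reads.foldl (fun d p => d.modify p.1 [] (· ++ [p.2])) PySem.Dict.empty).getD k [])
           (PySem.List.sorted
             (reads.foldl (fun d p => d.modify p.1 [] (· ++ [p.2])) PySem.Dict.empty).keys
             (fun k => k) false) [] 0 0).1).flatMap
         (fun kl => ((reads.foldl (fun d p => d.modify p.1 [] (· ++ [p.2])) PySem.Dict.empty).getD kl.1 []).map
           (fun rid => (rid, kl.2))),
       (pvBLab m (fun k => (reads.foldl (fun d p => d.modify p.1 [] (· ++ [p.2])) PySem.Dict.empty).getD k [])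
         (PySem.List.sorted
           (reads.foldl (fun d p => d.modify p.1 [] (· ++ [p.2])) PySem.Dict.empty).keys
           (fun k => k) false) [] 0 0).2) := by
  have hkeys : (reads.foldl (fun d p => d.modify p.1 [] (· ++ [p.2])) PySem.Dict.empty).keys
      = PySem.Set.ofList (reads.map Prod.fst) := by
    rw [PySem.Dict.keys_foldl_modify_key reads Prod.fst [] (fun d p v => v ++ [p.2]),
      PySem.Dict.keys_empty, PySem.Set.update_nil_left]
  have hgetD : ∀ k, (reads.foldl (fun d p => d.modify p.1 [] (· ++ [p.2])) PySem.Dict.empty).getD k []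
      = (reads.filter (fun z : Int × Int => z.1 == k)).map Prod.snd := by
    intro k
    rw [PySem.Dict.getD_foldl_modify_append, PySem.Dict.getD_empty]
    simp
  have hp := PySem.List.sorted_ofList_pairwise_lt (reads.map Prod.fst)
  have hkeyg : ∀ k, ∀ y ∈ reads.filter (fun z : Int × Int => z.1 == k), y.1 = k := by
    intro k y hy
    simpa using List.of_mem_filter hy
  have hne : ∀ k ∈ PySem.List.sorted (PySem.Set.ofList (reads.map Prod.fst)) (fun k => k) false,
      reads.filter (fun z : Int × Int => z.1 == k) ≠ [] := by
    intro k hk hnil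
    have hk' : k ∈ reads.map Prod.fst := by
      rw [PySem.List.mem_sorted, PySem.Set.mem_ofList] at hk
      exact hk
    obtain ⟨y, hy, hyk⟩ := List.mem_map.mp hk'
    have := List.filter_eq_nil_iff.mp hnil y hy
    simp [hyk] at this
  rw [pvAOuter_eq_pvRun m _ _ [] 0 0 0 (by omega), List.drop_zero, pvSorted_eq_flatMap]
  simp only [hkeys, hgetD]
  rw [pvRun_blocks m (fun k => reads.filter (fun z : Int × Int => z.1 == k))
      (fun k => (reads.filter (fun z : Int × Int => z.1 == k)).map Prod.snd)
      _ hp (fun k _ => hkeyg k) hne (fun k _ => rfl)]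
  simp

-- ===== VERDICT (by name: the statement is the Claim_ definition above) =====
theorem construct_hierarchies_spec : Claim_equal_construct_hierarchies := by
  intro alignments min_leaf_size _
  unfold Spec_construct_hierarchies construct_hierarchies construct_hierarchies_alt
  congr 1
  funext acc reads
  simp only []
  rw [pvPerReads min_leaf_size reads]
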